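-- pv_equiv track=rewrite | github.com/paiml/depyler | examples/hard_final_db_bitmap.py | multi_value_bitmap
-- ===== SOURCE A (Python) =====
-- def create_bitmap(num_rows: int) -> list[int]:
--     """Create a zero bitmap of given size."""
--     result: list[int] = []
--     i: int = 0
--     while i < num_rows:
--         result.append(0)
--         i = i + 1
--     return result
--
-- def build_bitmap(column: list[int], target_val: int) -> list[int]:
--     """Build bitmap for rows where column == target_val."""
--     result: list[int] = []
--     i: int = 0
--     while i < len(column):
--         cv: int = column[i]
--         if cv == target_val:
--             result.append(1)
--         else:
--             result.append(0)
--         i = i + 1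
--     return result
--
-- def bitmap_or(bm_a: list[int], bm_b: list[int]) -> list[int]:
--     """Bitwise OR of two bitmaps."""
--     result: list[int] = []
--     i: int = 0
--     while i < len(bm_a):
--         va: int = bm_a[i]
--         vb: int = bm_b[i]
--         if va == 1:
--             result.append(1)
--         else:
--             if vb == 1:
--                 result.append(1)
--             else:
--                 result.append(0)
--         i = i + 1
--     return result
--
-- def multi_value_bitmap(column: list[int], values: list[int]) -> list[int]:
--     """Build bitmap for rows where column value is in values list."""
--     result: list[int] = create_bitmap(len(column))
--     vi: int = 0
--     while vi < len(values):
--         target: int = values[vi]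
--         bm: list[int] = build_bitmap(column, target)
--         result = bitmap_or(result, bm)
--         vi = vi + 1
--     return result
-- ===== SOURCE B (Python) =====
-- def multi_value_bitmap(column: list[int], values: list[int]) -> list[int]:
--     """Build bitmap for rows where column value is in values list."""
--     vset = set(values)
--     return [1 if c in vset else 0 for c in column]
-- ===== Notes on version B (the rewrite author's own statement) =====
-- stated objective: faster
-- what changed: Replaces A's per-value full-column bitmap builds and pairwise OR reductions with a precomputed set of values and a single membership-filtered pass over the column.
import Mathlib
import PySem

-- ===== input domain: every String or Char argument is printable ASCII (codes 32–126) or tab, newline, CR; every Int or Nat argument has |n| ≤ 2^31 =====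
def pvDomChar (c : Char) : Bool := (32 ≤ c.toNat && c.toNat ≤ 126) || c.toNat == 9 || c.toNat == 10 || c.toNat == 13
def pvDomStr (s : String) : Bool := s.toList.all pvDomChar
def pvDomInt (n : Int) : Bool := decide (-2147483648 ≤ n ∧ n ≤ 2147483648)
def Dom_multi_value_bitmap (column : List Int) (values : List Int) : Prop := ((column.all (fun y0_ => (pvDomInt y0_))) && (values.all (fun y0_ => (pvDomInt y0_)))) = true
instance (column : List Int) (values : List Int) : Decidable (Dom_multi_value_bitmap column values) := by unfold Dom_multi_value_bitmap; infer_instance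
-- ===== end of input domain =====

-- B replaces A's per-value column scans and OR reduction by one set-membership pass over the column (faster).

-- ===== PORT A =====
def create_bitmap (num_rows : Int) : List Int :=
  (PySem.List.pyRange 0 num_rows 1).foldl (fun result _i => result ++ [(0 : Int)]) []

-- column[i] ported as pyGetD (i is always in range inside the loop, so this is exact)
def build_bitmap (column : List Int) (target_val : Int) : List Int :=
  (PySem.List.pyRange 0 (PySem.List.len column) 1).foldl
    (fun result i =>
      let cv : Int := PySem.List.pyGetD column i 0
      if cv = target_val then result ++ [1] else result ++ [0]) []

def bitmap_or (bm_a : List Int) (bm_b : List Int) : List Int :=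
  (PySem.List.pyRange 0 (PySem.List.len bm_a) 1).foldl
    (fun result i =>
      let va : Int := PySem.List.pyGetD bm_a i 0
      let vb : Int := PySem.List.pyGetD bm_b i 0
      if va = 1 then result ++ [1]
      else if vb = 1 then result ++ [1] else result ++ [0]) []

def multi_value_bitmap (column : List Int) (values : List Int) : List Int :=
  (PySem.List.pyRange 0 (PySem.List.len values) 1).foldl
    (fun result vi =>
      let target : Int := PySem.List.pyGetD values vi 0
      bitmap_or result (build_bitmap column target))
    (create_bitmap (PySem.List.len column))

-- ===== PORT B =====
def multi_value_bitmap_alt (column : List Int) (values : List Int) : List Int :=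
  let vset := PySem.Set.ofList values
  column.map (fun c => if PySem.Set.contains vset c then 1 else 0)

-- ===== PRECONDITION & SPEC =====
def Spec_multi_value_bitmap (column : List Int) (values : List Int) (out : List Int) : Prop := out = multi_value_bitmap_alt column values
instance (column : List Int) (values : List Int) (out : List Int) : Decidable (Spec_multi_value_bitmap column values out) := by unfold Spec_multi_value_bitmap; infer_instance

-- ===== CLAIM (what is proved, stated in full; the proofs are below) =====
def Claim_equal_multi_value_bitmap : Prop := ∀ (column : List Int) (values : List Int), Dom_multi_value_bitmap column values → Spec_multi_value_bitmap column values (multi_value_bitmap column values)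

-- ===== LEMMAS AND PROOFS =====

theorem create_bitmap_eq (xs : List Int) :
    create_bitmap (PySem.List.len xs) = xs.map (fun _ => 0) := by
  unfold create_bitmap
  simp only [PySem.List.len_eq]
  rw [PySem.List.foldl_pyRange_zero_pyGetD' xs 0 (fun acc (_c : Int) => acc ++ [(0 : Int)]) []]
  rw [PySem.List.foldl_append_singleton_eq_map (f := fun (_c : Int) => (0 : Int))]
  simp

theorem build_bitmap_eq (xs : List Int) (t : Int) :
    build_bitmap xs t = xs.map (fun c => if c = t then 1 else 0) := by
  unfold build_bitmap
  simp only [PySem.List.len_eq]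
  have hbody : (fun (result : List Int) (i : Int) =>
      let cv : Int := PySem.List.pyGetD xs i 0
      if cv = t then result ++ [1] else result ++ [0])
      = fun (acc : List Int) (i : Int) =>
        (fun (a : List Int) (c : Int) => a ++ [if c = t then (1 : Int) else 0]) acc
          (PySem.List.pyGetD xs i 0) := by
    funext acc i
    by_cases h : PySem.List.pyGetD xs i 0 = t <;> simp [h]
  rw [hbody,
    PySem.List.foldl_pyRange_zero_pyGetD' xs 0
      (fun (a : List Int) (c : Int) => a ++ [if c = t then (1 : Int) else 0]) [],
    PySem.List.foldl_append_singleton_eq_map (f := fun (c : Int) => if c = t then (1 : Int) else 0)]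
  simp

theorem bitmap_or_map (xs : List Int) (f g : Int → Int) :
    bitmap_or (xs.map f) (xs.map g)
      = xs.map (fun c => if f c = 1 then 1 else if g c = 1 then 1 else 0) := by
  unfold bitmap_or
  simp only [PySem.List.len_eq, List.length_map]
  have hbody : (PySem.List.pyRange 0 (xs.length : Int) 1).foldl
      (fun (result : List Int) (i : Int) =>
        let va : Int := PySem.List.pyGetD (xs.map f) i 0
        let vb : Int := PySem.List.pyGetD (xs.map g) i 0
        if va = 1 then result ++ [1]
        else if vb = 1 then result ++ [1] else result ++ [0]) []
      = (PySem.List.pyRange 0 (xs.length : Int) 1).foldl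
        (fun (acc : List Int) (i : Int) =>
          (fun (a : List Int) (c : Int) =>
            a ++ [if f c = 1 then (1 : Int) else if g c = 1 then 1 else 0]) acc
            (PySem.List.pyGetD xs i 0)) [] := by
    apply PySem.List.foldl_congr_mem
    intro acc i hi
    rcases (PySem.List.mem_pyRange_one).1 hi with ⟨h0, h1⟩
    have hlt : i < ((xs.map f).length : Int) := by simpa using h1
    have hlt' : i < ((xs.map g).length : Int) := by simpa using h1
    have ha := PySem.List.pyGetD_eq_getElem (xs := xs.map f) (d := 0) h0 hlt
    have hb := PySem.List.pyGetD_eq_getElem (xs := xs.map g) (d := 0) h0 hlt'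
    have hx := PySem.List.pyGetD_eq_getElem (xs := xs) (d := 0) h0 (by simpa using h1)
    simp only [ha, hb, hx, List.getElem_map]
    by_cases hf : f xs[i.toNat] = 1 <;> by_cases hg : g xs[i.toNat] = 1 <;> simp [hf, hg]
  rw [hbody,
    PySem.List.foldl_pyRange_zero_pyGetD' xs 0
      (fun (a : List Int) (c : Int) =>
        a ++ [if f c = 1 then (1 : Int) else if g c = 1 then 1 else 0]) [],
    PySem.List.foldl_append_singleton_eq_map]
  simp

theorem or_step (xs : List Int) (p : Int → Bool) (t : Int) :
    bitmap_or (xs.map (fun c => if p c then 1 else 0)) (build_bitmap xs t)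
      = xs.map (fun c => if (p c || (c == t)) then 1 else 0) := by
  rw [build_bitmap_eq, bitmap_or_map]
  refine List.map_congr_left (fun c _ => ?_)
  by_cases hp : p c = true <;> by_cases ht : c = t <;> simp [hp, ht]

theorem main_invariant (vs : List Int) : ∀ (xs : List Int) (p : Int → Bool),
    vs.foldl (fun result t => bitmap_or result (build_bitmap xs t))
      (xs.map (fun c => if p c then 1 else 0))
      = xs.map (fun c => if (p c || vs.contains c) then 1 else 0) := by
  induction vs with
  | nil => intro xs p; simp
  | cons t vs ih =>
    intro xs p
    simp only [List.foldl_cons, or_step]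
    rw [ih xs (fun c => p c || (c == t))]
    refine List.map_congr_left (fun c _ => ?_)
    simp [Bool.or_assoc]

-- ===== VERDICT (by name: the statement is the Claim_ definition above) =====
theorem multi_value_bitmap_spec : Claim_equal_multi_value_bitmap := by
  intro column values _hdom
  unfold Spec_multi_value_bitmap multi_value_bitmap multi_value_bitmap_alt
  have hbody : (fun (result : List Int) (vi : Int) =>
      let target : Int := PySem.List.pyGetD values vi 0
      bitmap_or result (build_bitmap column target))
      = fun (acc : List Int) (vi : Int) =>
        (fun (r : List Int) (t : Int) => bitmap_or r (build_bitmap column t)) acc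
          (PySem.List.pyGetD values vi 0) := rfl
  rw [hbody, create_bitmap_eq,
    PySem.List.foldl_pyRange_zero_pyGetD values 0
      (fun (r : List Int) (t : Int) => bitmap_or r (build_bitmap column t)) _]
  rw [show (column.map (fun _ => (0 : Int)))
      = column.map (fun c => if (fun _ : Int => false) c then 1 else 0) from by simp]
  rw [main_invariant values column (fun _ => false)]
  refine List.map_congr_left (fun c _ => ?_)
  simp [PySem.Set.contains, PySem.Set.mem_ofList]
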